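-- pv_equiv track=rewrite | github.com/OH-YUNJU/Coding | 프로그래머스/1/86491. 최소직사각형/최소직사각형.py | solution
-- ===== SOURCE A (Python) =====
-- def solution(sizes):
--     answer = 0
--     ga = []
--     se = []
--
--     for a, b in sizes:
--         if(a < b):
--             ga.append(b)
--             se.append(a)
--         else:
--             ga.append(a)
--             se.append(b)
--
--     answer = max(ga) * max(se)
--
--     return answer
-- ===== SOURCE B (Python) =====
-- def solution(sizes):
--     # Divide and conquer: summarise each half as (largest long side, largest
--     # short side), merge summaries, multiply at the top.
--     def span(chunk):
--         if len(chunk) == 1: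
--             a, b = chunk[0]
--             return (a, b) if a >= b else (b, a)
--         mid = len(chunk) // 2
--         g1, s1 = span(chunk[:mid])
--         g2, s2 = span(chunk[mid:])
--         return (max(g1, g2), max(s1, s2))
--     g, s = span(sizes)
--     return g * s
-- ===== Notes on version B (the rewrite author's own statement) =====
-- stated objective: alternative
-- what changed: Replaces A's list-building loop plus two max() scans by a recursive divide-and-conquer: the list is split in halves, each half summarised as a (max long side, max short side) pair, summaries merged on the way up and multiplied at the root.
-- outside the precondition, e.g. on solution([]): A raises ValueError, B raises RecursionError
import Mathlib
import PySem

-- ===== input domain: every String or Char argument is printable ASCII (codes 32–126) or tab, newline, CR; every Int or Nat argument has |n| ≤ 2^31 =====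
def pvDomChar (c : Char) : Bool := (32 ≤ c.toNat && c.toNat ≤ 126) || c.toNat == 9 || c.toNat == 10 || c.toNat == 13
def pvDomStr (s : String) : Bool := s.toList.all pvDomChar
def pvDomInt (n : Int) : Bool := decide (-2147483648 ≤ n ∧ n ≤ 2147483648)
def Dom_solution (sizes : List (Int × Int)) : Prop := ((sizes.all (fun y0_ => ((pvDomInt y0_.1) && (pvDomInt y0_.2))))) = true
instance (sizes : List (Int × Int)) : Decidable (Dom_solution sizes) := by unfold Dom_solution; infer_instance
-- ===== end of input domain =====

-- B replaces A's list-building loop and two max() scans by a recursive divide-and-conquer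
-- merging (max long side, max short side) summaries of halves; objective: alternative.

-- ===== PORT A =====
def solution (sizes : List (Int × Int)) : Int :=
  -- answer = 0; ga = []; se = []; for a,b in sizes: …  (lists built by append, as in A)
  let acc := sizes.foldl
    (fun (acc : List Int × List Int) ab =>
      if ab.1 < ab.2 then (acc.1 ++ [ab.2], acc.2 ++ [ab.1])
      else (acc.1 ++ [ab.1], acc.2 ++ [ab.2]))
    ([], [])
  -- answer = max(ga) * max(se)  (max([]) raises ValueError: excluded by Pre_)
  match PySem.List.max? acc.1 (fun x => x), PySem.List.max? acc.2 (fun x => x) with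
  | some g, some s => g * s
  | _, _ => 0

-- ===== PORT B =====
-- span(chunk): (max long side, max short side) of a nonempty chunk, by halving.
-- (Fuel = chunk.length bounds the recursion depth so the port is structural; for the
--  empty chunk Python's span never returns — that input is outside Pre_ — and the []
--  and fuel-0 branches exist only to make the port total.)
def solutionSpanF : Nat → List (Int × Int) → Int × Int
  | _, [] => (0, 0)
  | _, [p] => if p.1 ≥ p.2 then (p.1, p.2) else (p.2, p.1)
  | 0, _ => (0, 0)
  | fuel + 1, chunk =>
      let mid := chunk.length / 2
      let l := solutionSpanF fuel (chunk.take mid)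
      let r := solutionSpanF fuel (chunk.drop mid)
      (max l.1 r.1, max l.2 r.2)

def solutionSpan (chunk : List (Int × Int)) : Int × Int :=
  solutionSpanF chunk.length chunk

def solution_alt (sizes : List (Int × Int)) : Int :=
  let gs := solutionSpan sizes
  gs.1 * gs.2

-- ===== PRECONDITION & SPEC =====
-- Pre_ excludes only the empty list, on which A's max([]) raises ValueError (B's recursion does not return there either).
def Pre_solution (sizes : List (Int × Int)) : Prop := sizes ≠ []
instance (sizes : List (Int × Int)) : Decidable (Pre_solution sizes) := by unfold Pre_solution; infer_instance
def pvWitness_solution : (List (Int × Int)) := [(3, 5), (7, 2)]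

def Spec_solution (sizes : List (Int × Int)) (out : Int) : Prop := out = solution_alt sizes
instance (sizes : List (Int × Int)) (out : Int) : Decidable (Spec_solution sizes out) := by unfold Spec_solution; infer_instance

-- ===== CLAIM (what is proved, stated in full; the proofs are below) =====
def Claim_equal_solution : Prop := ∀ (sizes : List (Int × Int)), Dom_solution sizes → Pre_solution sizes → Spec_solution sizes (solution sizes)

-- ===== LEMMAS AND PROOFS =====

-- running max of a projection over a nonempty list (the common value of both programs)
def runMax (f : Int × Int → Int) : List (Int × Int) → Int
  | [] => 0
  | p :: t => (t.map f).foldl max (f p)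

theorem foldl_max_max (l : List Int) (a b : Int) :
    l.foldl max (max a b) = max a (l.foldl max b) := by
  induction l generalizing b with
  | nil => simp
  | cons c t ih => simpa [max_assoc] using ih (max b c)

theorem runMax_append (f : Int × Int → Int) (l₁ l₂ : List (Int × Int))
    (h₁ : l₁ ≠ []) (h₂ : l₂ ≠ []) :
    runMax f (l₁ ++ l₂) = max (runMax f l₁) (runMax f l₂) := by
  cases l₁ with
  | nil => exact absurd rfl h₁
  | cons x t₁ =>
    cases l₂ with
    | nil => exact absurd rfl h₂
    | cons y t₂ =>
      simp only [runMax, List.cons_append, List.map_append, List.map_cons,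
        List.foldl_append, List.foldl_cons]
      rw [foldl_max_max]

-- A's list-building fold, started from any accumulator, appends exactly the per-pair max/min maps.
theorem solution_fold_eq (sizes : List (Int × Int)) (g s : List Int) :
    sizes.foldl
      (fun (acc : List Int × List Int) ab =>
        if ab.1 < ab.2 then (acc.1 ++ [ab.2], acc.2 ++ [ab.1])
        else (acc.1 ++ [ab.1], acc.2 ++ [ab.2]))
      (g, s)
    = (g ++ sizes.map (fun p => max p.1 p.2), s ++ sizes.map (fun p => min p.1 p.2)) := by
  induction sizes generalizing g s with
  | nil => simp
  | cons hd tl ih =>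
    simp only [List.foldl_cons, List.map_cons]
    by_cases h : hd.1 < hd.2
    · simp [h, ih, max_eq_right (le_of_lt h), min_eq_left (le_of_lt h)]
    · have h' : hd.2 ≤ hd.1 := not_lt.mp h
      simp [if_neg h, ih, max_eq_left h', min_eq_right h']

-- B's span computes exactly the two running maxima on any nonempty chunk (given enough fuel).
theorem solutionSpanF_eq (fuel : Nat) (chunk : List (Int × Int)) (hne : chunk ≠ [])
    (hf : chunk.length ≤ fuel + 1) :
    solutionSpanF fuel chunk
      = (runMax (fun p => max p.1 p.2) chunk, runMax (fun p => min p.1 p.2) chunk) := by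
  induction fuel generalizing chunk with
  | zero =>
    match chunk, hne with
    | [p], _ =>
      by_cases hp : p.1 ≥ p.2
      · simp [solutionSpanF, runMax, hp]
      · have hlt : p.1 < p.2 := lt_of_not_ge hp
        simp [solutionSpanF, runMax, hp, max_eq_right (le_of_lt hlt), min_eq_left (le_of_lt hlt)]
    | p :: q :: rest, _ => simp at hf
  | succ f ih =>
    match chunk, hne with
    | [p], _ =>
      by_cases hp : p.1 ≥ p.2
      · simp [solutionSpanF, runMax, hp]
      · have hlt : p.1 < p.2 := lt_of_not_ge hp
        simp [solutionSpanF, runMax, hp, max_eq_right (le_of_lt hlt), min_eq_left (le_of_lt hlt)]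
    | p :: q :: rest, _ =>
      set chunk := p :: q :: rest with hch
      have hlen : 2 ≤ chunk.length := by simp [hch]
      have hmid1 : 1 ≤ chunk.length / 2 := by omega
      have hmidlt : chunk.length / 2 < chunk.length := by omega
      have htne : chunk.take (chunk.length / 2) ≠ [] := by
        intro he; have := congrArg List.length he
        simp only [List.length_take, List.length_nil] at this; omega
      have hdne : chunk.drop (chunk.length / 2) ≠ [] := by
        intro he; have := congrArg List.length he
        simp only [List.length_drop, List.length_nil] at this; omega
      have hft : (chunk.take (chunk.length / 2)).length ≤ f + 1 := by
        simp only [List.length_take]; omega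
      have hfd : (chunk.drop (chunk.length / 2)).length ≤ f + 1 := by
        simp only [List.length_drop]; omega
      show solutionSpanF (f + 1) chunk = _
      rw [hch]
      show (let mid := (p :: q :: rest).length / 2
            let l := solutionSpanF f ((p :: q :: rest).take mid)
            let r := solutionSpanF f ((p :: q :: rest).drop mid)
            (max l.1 r.1, max l.2 r.2)) = _
      simp only [← hch]
      rw [ih _ htne hft, ih _ hdne hfd]
      have hsplit : chunk = chunk.take (chunk.length / 2) ++ chunk.drop (chunk.length / 2) :=
        (List.take_append_drop _ chunk).symm
      rw [show (runMax (fun p => max p.1 p.2) chunk, runMax (fun p => min p.1 p.2) chunk)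
          = (runMax (fun p => max p.1 p.2) (chunk.take (chunk.length / 2) ++ chunk.drop (chunk.length / 2)),
             runMax (fun p => min p.1 p.2) (chunk.take (chunk.length / 2) ++ chunk.drop (chunk.length / 2))) from by
          rw [← hsplit]]
      rw [runMax_append _ _ _ htne hdne, runMax_append _ _ _ htne hdne]

theorem solutionSpan_eq (chunk : List (Int × Int)) (h : chunk ≠ []) :
    solutionSpan chunk
      = (runMax (fun p => max p.1 p.2) chunk, runMax (fun p => min p.1 p.2) chunk) := by
  cases chunk with
  | nil => exact absurd rfl h
  | cons hd tl =>
    unfold solutionSpan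
    exact solutionSpanF_eq _ _ h (by omega)

-- ===== VERDICT (by name: the statement is the Claim_ definition above) =====
theorem solution_spec : Claim_equal_solution := by
  intro sizes _ hpre
  unfold Spec_solution solution solution_alt
  rw [solutionSpan_eq sizes hpre]
  cases sizes with
  | nil => exact absurd rfl hpre
  | cons hd tl =>
    rw [solution_fold_eq]
    simp [PySem.List.max?_id_cons, runMax]
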